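-- pv_equiv track=rewrite | github.com/SauravSinha76/scaler2 | class66/Product_of_3.py | solve
-- ===== SOURCE A (Python) =====
-- import heapq
--
-- def solve(A):
--     ans =[-1,-1]
--     if len(A) < 3:
--         return ans
--     p = A[0] * A[1] * A[2]
--     ans.append(p)
--     heap = [A[0],A[1],A[2]]
--     heapq.heapify(heap)
--     for i in range(3, len(A)):
--         if heap[0] < A[i]:
--             p *= A[i]
--             val = heapq.heappop(heap)
--             p //= val
--             ans.append(p)
--             heapq.heappush(heap,A[i])
--     return ans
-- ===== SOURCE B (Python) =====
-- def solve(A):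
--     # Track the three largest seen so far as sorted variables a >= b >= c and
--     # append their plain product; no heap and no running-quotient division.
--     if len(A) < 3:
--         return [-1, -1]
--     a, b, c = A[0], A[1], A[2]
--     if b > a:
--         a, b = b, a
--     if c > b:
--         b, c = c, b
--     if b > a:
--         a, b = b, a
--     ans = [-1, -1, a * b * c]
--     for x in A[3:]:
--         if c < x:
--             if x >= a:
--                 a, b, c = x, a, b
--             elif x >= b:
--                 b, c = x, b
--             else:
--                 c = x
--             ans.append(a * b * c)
--     return ans
-- ===== Notes on version B (the rewrite author's own statement) =====
-- stated objective: simpler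
-- what changed: Replaces the size-3 heap (heapify/heappop/heappush) and the running product maintained by multiply-then-floor-divide with three explicitly sorted variables holding the three largest elements, appending their plain product, so the heap machinery and the division disappear.
import Mathlib
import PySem

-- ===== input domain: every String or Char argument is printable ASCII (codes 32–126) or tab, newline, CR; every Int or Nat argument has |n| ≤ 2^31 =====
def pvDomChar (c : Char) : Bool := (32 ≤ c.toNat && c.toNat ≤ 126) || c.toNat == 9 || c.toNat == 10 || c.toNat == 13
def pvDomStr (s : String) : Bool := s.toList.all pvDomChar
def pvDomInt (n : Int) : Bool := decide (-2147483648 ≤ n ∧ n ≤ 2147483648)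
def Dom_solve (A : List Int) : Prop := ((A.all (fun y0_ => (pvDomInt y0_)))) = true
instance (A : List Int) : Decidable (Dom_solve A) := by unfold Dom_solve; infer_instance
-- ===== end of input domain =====

-- B replaces A's size-3 heap and running floor-division quotient by three sorted
-- variables whose plain product is appended (objective: simpler; no speed claim).

-- ===== PORT A =====
-- heapq specialized to the fixed sizes A uses (heapify of 3, pop 3→2, push 2→3);
-- each is the exact result of CPython's _siftup/_siftdown on lists of that length.
def heapify3 (a b c : Int) : Int × Int × Int :=
  if b < c then (if a < b then (a, b, c) else (b, a, c))
  else (if a < c then (a, b, c) else (c, b, a))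

def pop3 (h : Int × Int × Int) : Int × (Int × Int) :=
  (h.1, if h.2.2 < h.2.1 then (h.2.2, h.2.1) else (h.2.1, h.2.2))

def push3 (h : Int × Int) (w : Int) : Int × Int × Int :=
  if w < h.1 then (w, h.2, h.1) else (h.1, h.2, w)

-- loop body of A: state = (heap, p, ans), x = A[i]
def stepA (st : (Int × Int × Int) × Int × List Int) (x : Int) : (Int × Int × Int) × Int × List Int :=
  if st.1.1 < x then
    let val := (pop3 st.1).1
    let p' := PySem.Int.floordiv (st.2.1 * x) val
    (push3 (pop3 st.1).2 x, p', st.2.2 ++ [p'])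
  else st

def solve (A : List Int) : List Int :=
  if A.length < 3 then [-1, -1] else
  let a0 := PySem.List.pyGetD A 0 0
  let a1 := PySem.List.pyGetD A 1 0
  let a2 := PySem.List.pyGetD A 2 0
  let p := a0 * a1 * a2
  ((PySem.List.pyRange 3 (A.length : Int)).foldl
      (fun st i => stepA st (PySem.List.pyGetD A i 0))
      (heapify3 a0 a1 a2, p, [-1, -1, p])).2.2

-- ===== PORT B =====
-- the three compare-swap assignments of Source B, each swap written componentwise
def sort3 (x y z : Int) : Int × Int × Int :=
  let a1 := if y > x then y else x
  let b1 := if y > x then x else y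
  let b2 := if z > b1 then z else b1
  let c2 := if z > b1 then b1 else z
  let a3 := if b2 > a1 then b2 else a1
  let b3 := if b2 > a1 then a1 else b2
  (a3, b3, c2)

-- loop body of B: state = ((a,b,c), ans), x the next element
def stepB (st : (Int × Int × Int) × List Int) (x : Int) : (Int × Int × Int) × List Int :=
  if st.1.2.2 < x then
    let t := if st.1.1 ≤ x then (x, st.1.1, st.1.2.1)
             else if st.1.2.1 ≤ x then (st.1.1, x, st.1.2.1)
             else (st.1.1, st.1.2.1, x)
    (t, st.2 ++ [t.1 * t.2.1 * t.2.2])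
  else st

def solve_alt (A : List Int) : List Int :=
  if A.length < 3 then [-1, -1] else
  let t := sort3 (PySem.List.pyGetD A 0 0) (PySem.List.pyGetD A 1 0) (PySem.List.pyGetD A 2 0)
  -- A[3:]: since len(A) ≥ 3 here, the slice is exactly drop 3
  ((A.drop 3).foldl stepB (t, [-1, -1, t.1 * t.2.1 * t.2.2])).2

-- ===== PRECONDITION & SPEC =====
-- Pre_ excludes exactly the inputs on which A raises ZeroDivisionError: those where,
-- at some position i ≥ 3, the third-largest value of A[:i] is 0 (at most two elements
-- of A[:i] are positive while at least three are nonnegative) and A[i] > 0.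
def Pre_solve (A : List Int) : Prop :=
  ∀ i : Nat, (h : i < A.length) → 3 ≤ i →
    ¬(((A.take i).countP (fun y => decide (0 < y)) ≤ 2 ∧
       3 ≤ (A.take i).countP (fun y => decide (0 ≤ y))) ∧ 0 < A[i])

instance (A : List Int) : Decidable (Pre_solve A) := by unfold Pre_solve; infer_instance

def pvWitness_solve : List Int := [1, 2, 3, 4]

def Spec_solve (A : List Int) (out : List Int) : Prop := out = solve_alt A
instance (A : List Int) (out : List Int) : Decidable (Spec_solve A out) := by unfold Spec_solve; infer_instance

-- ===== CLAIM (what is proved, stated in full; the proofs are below) =====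
def Claim_equal_solve : Prop := ∀ (A : List Int), Dom_solve A → Pre_solve A → Spec_solve A (solve A)

-- ===== LEMMAS AND PROOFS =====

-- counts pinning (a,b,c) as the three largest elements (with multiplicity) of pr
def TopInv (pr : List Int) (t : Int × Int × Int) : Prop :=
  t.2.2 ≤ t.2.1 ∧ t.2.1 ≤ t.1 ∧
  pr.countP (fun y => decide (t.1 < y)) = 0 ∧
  pr.countP (fun y => decide (t.2.1 < y)) ≤ 1 ∧
  pr.countP (fun y => decide (t.2.2 < y)) ≤ 2 ∧
  1 ≤ pr.countP (fun y => decide (t.1 ≤ y)) ∧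
  2 ≤ pr.countP (fun y => decide (t.2.1 ≤ y)) ∧
  3 ≤ pr.countP (fun y => decide (t.2.2 ≤ y))

lemma countP_append_single (pr : List Int) (x v : Int) (cmp : Int → Int → Prop)
    [DecidableRel cmp] :
    (pr ++ [x]).countP (fun y => decide (cmp v y)) =
      pr.countP (fun y => decide (cmp v y)) + (if cmp v x then 1 else 0) := by
  simp [List.countP_append, List.countP_cons]

lemma countP_mono_lt (pr : List Int) (u v : Int) (h : v ≤ u) :
    pr.countP (fun y => decide (u < y)) ≤ pr.countP (fun y => decide (v < y)) := by
  apply List.countP_mono_left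
  intro y _ hy
  simp only [decide_eq_true_eq] at hy ⊢
  omega

lemma countP_mono_le (pr : List Int) (u v : Int) (h : v ≤ u) :
    pr.countP (fun y => decide (u ≤ y)) ≤ pr.countP (fun y => decide (v ≤ y)) := by
  apply List.countP_mono_left
  intro y _ hy
  simp only [decide_eq_true_eq] at hy ⊢
  omega

lemma sort3_prod (x y z : Int) :
    (sort3 x y z).1 * (sort3 x y z).2.1 * (sort3 x y z).2.2 = x * y * z := by
  unfold sort3
  by_cases h1 : y > x <;>
    simp only [h1, ite_true, ite_false] <;>
    split_ifs <;> ring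

lemma init_couple (x y z : Int) :
    (heapify3 x y z).1 = (sort3 x y z).2.2 ∧
    ((heapify3 x y z).2 = ((sort3 x y z).1, (sort3 x y z).2.1) ∨
     (heapify3 x y z).2 = ((sort3 x y z).2.1, (sort3 x y z).1)) ∧
    TopInv [x, y, z] (sort3 x y z) := by
  unfold heapify3 sort3 TopInv
  by_cases h1 : y > x <;>
    simp only [h1, ite_true, ite_false] <;>
    split_ifs <;>
    simp_all [List.countP_cons, Prod.mk.injEq, decide_eq_true_eq] <;>
    (try split_ifs) <;> omega

lemma exact_div (a b c x : Int) (hc : c ≠ 0) :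
    PySem.Int.floordiv (a * b * c * x) c = a * b * x := by
  have h : a * b * c * x = c * (a * b * x) := by ring
  rw [h]
  exact Int.mul_fdiv_cancel_left _ hc

lemma loop_eq (l : List Int) : ∀ (pr : List Int) (heap t : Int × Int × Int) (p : Int)
    (ans : List Int),
    heap.1 = t.2.2 →
    (heap.2 = (t.1, t.2.1) ∨ heap.2 = (t.2.1, t.1)) →
    p = t.1 * t.2.1 * t.2.2 →
    TopInv pr t →
    (∀ j : Nat, (hj : j < l.length) →
      ¬(((pr ++ l.take j).countP (fun y => decide (0 < y)) ≤ 2 ∧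
         3 ≤ (pr ++ l.take j).countP (fun y => decide (0 ≤ y))) ∧ 0 < l[j])) →
    (l.foldl stepA (heap, p, ans)).2.2 = (l.foldl stepB (t, ans)).2 := by
  induction l with
  | nil => intro pr heap t p ans _ _ _ _ _; rfl
  | cons x l ih =>
    intro pr heap t p ans hc hpair hp hinv hpre
    obtain ⟨a, b, c⟩ := t
    obtain ⟨hcb, hba, K0, K1a, K1b, K2a, K2b, K2c⟩ := hinv
    simp only at hcb hba K0 K1a K1b K2a K2b K2c hc hpair hp
    rw [List.foldl_cons, List.foldl_cons]
    by_cases hx : c < x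
    · -- branch taken on both sides
      have hcx : heap.1 < x := by rw [hc]; exact hx
      have hcne : c ≠ 0 := by
        intro c0
        subst c0
        exact hpre 0 (by simp) (by simpa using ⟨⟨K1b, K2c⟩, hx⟩)
      have hval : (pop3 heap).1 = c := hc
      have hrem : (pop3 heap).2 = (b, a) := by
        rcases hpair with h2 | h2 <;>
          · unfold pop3; rw [h2]; split_ifs <;> simp <;> omega
      have hsA : stepA (heap, p, ans) x =
          (push3 (b, a) x, a * b * x, ans ++ [a * b * x]) := by
        unfold stepA
        simp only [hcx, if_pos, hval, hrem, hp]
        rw [exact_div a b c x hcne]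
      set t' : Int × Int × Int :=
        if a ≤ x then (x, a, b) else if b ≤ x then (a, x, b) else (a, b, x) with ht'
      have hsB : stepB ((a, b, c), ans) x = (t', ans ++ [a * b * x]) := by
        unfold stepB
        simp only [hx, if_pos, ht']
        split_ifs <;> simp <;> ring_nf
      rw [hsA, hsB]
      have hpre' : ∀ j : Nat, (hj : j < l.length) →
          ¬((((pr ++ [x]) ++ l.take j).countP (fun y => decide (0 < y)) ≤ 2 ∧
             3 ≤ ((pr ++ [x]) ++ l.take j).countP (fun y => decide (0 ≤ y))) ∧ 0 < l[j]) := by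
        intro j hj
        have h := hpre (j + 1) (by simpa using hj)
        simpa [List.append_assoc] using h
      apply ih (pr ++ [x]) (push3 (b, a) x) t' (a * b * x) (ans ++ [a * b * x]) ?_ ?_ ?_ ?_ hpre'
      case _ =>  -- heap head = new minimum
        by_cases hax : a ≤ x
        · rw [show push3 (b, a) x = (b, a, x) from by unfold push3; rw [if_neg (by omega)],
              show t' = (x, a, b) from by rw [ht', if_pos hax]]
        · by_cases hbx : b ≤ x
          · rw [show push3 (b, a) x = (b, a, x) from by unfold push3; rw [if_neg (by omega)],
                show t' = (a, x, b) from by rw [ht', if_neg hax, if_pos hbx]]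
          · rw [show push3 (b, a) x = (x, a, b) from by unfold push3; rw [if_pos (by omega)],
                show t' = (a, b, x) from by rw [ht', if_neg hax, if_neg hbx]]
      case _ =>  -- heap pair vs B's (a', b')
        by_cases hax : a ≤ x
        · rw [show push3 (b, a) x = (b, a, x) from by unfold push3; rw [if_neg (by omega)],
              show t' = (x, a, b) from by rw [ht', if_pos hax]]
          right; rfl
        · by_cases hbx : b ≤ x
          · rw [show push3 (b, a) x = (b, a, x) from by unfold push3; rw [if_neg (by omega)],
                show t' = (a, x, b) from by rw [ht', if_neg hax, if_pos hbx]]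
            left; rfl
          · rw [show push3 (b, a) x = (x, a, b) from by unfold push3; rw [if_pos (by omega)],
                show t' = (a, b, x) from by rw [ht', if_neg hax, if_neg hbx]]
            left; rfl
      case _ =>  -- product of the new triple
        rw [ht']; split_ifs <;> simp <;> ring
      case _ =>  -- TopInv (pr ++ [x]) t'
        by_cases hax : a ≤ x
        · rw [show t' = (x, a, b) from by rw [ht', if_pos hax]]
          refine ⟨by dsimp only; omega, by dsimp only; omega, ?_, ?_, ?_, ?_, ?_, ?_⟩ <;>
            dsimp only <;> rw [countP_append_single pr x _ _]
          · have := countP_mono_lt pr x a hax; split_ifs <;> omega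
          · split_ifs <;> omega
          · split_ifs <;> omega
          · split_ifs <;> omega
          · split_ifs <;> omega
          · split_ifs <;> omega
        · by_cases hbx : b ≤ x
          · rw [show t' = (a, x, b) from by rw [ht', if_neg hax, if_pos hbx]]
            refine ⟨by dsimp only; omega, by dsimp only; omega, ?_, ?_, ?_, ?_, ?_, ?_⟩ <;>
              dsimp only <;> rw [countP_append_single pr x _ _]
            · split_ifs <;> omega
            · have := countP_mono_lt pr x b hbx; split_ifs <;> omega
            · split_ifs <;> omega
            · split_ifs <;> omega
            · have := countP_mono_le pr a x (by omega); split_ifs <;> omega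
            · split_ifs <;> omega
          · rw [show t' = (a, b, x) from by rw [ht', if_neg hax, if_neg hbx]]
            refine ⟨by dsimp only; omega, by dsimp only; omega, ?_, ?_, ?_, ?_, ?_, ?_⟩ <;>
              dsimp only <;> rw [countP_append_single pr x _ _]
            · split_ifs <;> omega
            · split_ifs <;> omega
            · have := countP_mono_lt pr x c (by omega); split_ifs <;> omega
            · split_ifs <;> omega
            · split_ifs <;> omega
            · have := countP_mono_le pr b x (by omega); split_ifs <;> omega
    · -- branch not taken on either side
      have hcx : ¬ heap.1 < x := by rw [hc]; exact hx
      have hsA : stepA (heap, p, ans) x = (heap, p, ans) := by unfold stepA; simp [hcx]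
      have hsB : stepB ((a, b, c), ans) x = ((a, b, c), ans) := by unfold stepB; simp [hx]
      rw [hsA, hsB]
      apply ih (pr ++ [x]) heap (a, b, c) p ans hc hpair hp
      · refine ⟨hcb, hba, ?_, ?_, ?_, ?_, ?_, ?_⟩ <;>
          dsimp only <;> rw [countP_append_single _ _ _ _] <;> split_ifs <;> omega
      · intro j hj
        have h := hpre (j + 1) (by simpa using hj)
        simpa [List.append_assoc] using h

-- ===== VERDICT (by name: the statement is the Claim_ definition above) =====
theorem solve_spec : Claim_equal_solve := by
  intro A _ hpre
  unfold Spec_solve solve solve_alt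
  rcases A with _ | ⟨a0, A⟩
  · simp
  rcases A with _ | ⟨a1, A⟩
  · simp
  rcases A with _ | ⟨a2, rest⟩
  · simp
  have hlen : ¬ (a0 :: a1 :: a2 :: rest).length < 3 := by simp
  simp only [hlen, if_false]
  rw [PySem.List.foldl_pyRange_pyGetD' (a0 :: a1 :: a2 :: rest) 0 stepA _ (by norm_num)]
  rw [show PySem.List.pyGetD (a0 :: a1 :: a2 :: rest) 0 0 = a0 from
        PySem.List.pyGetD_ofNat' _ 0 _,
      show PySem.List.pyGetD (a0 :: a1 :: a2 :: rest) 1 0 = a1 from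
        PySem.List.pyGetD_ofNat' _ 1 _,
      show PySem.List.pyGetD (a0 :: a1 :: a2 :: rest) 2 0 = a2 from
        PySem.List.pyGetD_ofNat' _ 2 _]
  rw [show ((3 : Int).toNat) = 3 from rfl]
  rw [show List.drop 3 (a0 :: a1 :: a2 :: rest) = rest from rfl]
  obtain ⟨h1, h2, h4⟩ := init_couple a0 a1 a2
  have h3 := sort3_prod a0 a1 a2
  rw [show ([(-1 : Int), -1, a0 * a1 * a2]) =
        [-1, -1, (sort3 a0 a1 a2).1 * (sort3 a0 a1 a2).2.1 * (sort3 a0 a1 a2).2.2] by rw [h3]]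
  apply loop_eq rest [a0, a1, a2] _ _ _ _ h1 h2 h3.symm h4
  intro j hj hcond
  refine hpre (j + 3) (by simp; omega) (by omega) ⟨⟨?_, ?_⟩, ?_⟩
  · rw [show (a0 :: a1 :: a2 :: rest).take (j + 3) = [a0, a1, a2] ++ rest.take j by
        simp [List.take_succ_cons]]
    exact hcond.1.1
  · rw [show (a0 :: a1 :: a2 :: rest).take (j + 3) = [a0, a1, a2] ++ rest.take j by
        simp [List.take_succ_cons]]
    exact hcond.1.2
  · simpa using hcond.2
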